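-- pv_equiv track=rewrite | github.com/tainenko/Leetcode2019 | leetcode/editor/en/[2432]The Employee That Worked on the Longest Task.py | hardestWorker
-- ===== SOURCE A (Python) =====
-- from typing import List
--
-- def hardestWorker(n: int, logs: List[List[int]]) -> int:
--     longest = 0
--     res = float("inf")
--     start = 0
--     for eid, end_time in logs:
--         if end_time - start > longest:
--             longest = end_time - start
--             res = eid
--         if end_time - start == longest:
--             res = min(res, eid)
--         start = end_time
--     return res
-- ===== SOURCE B (Python) =====
-- def hardestWorker(n, logs):
--     pairs = []
--     start = 0
--     for eid, end_time in logs: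
--         pairs.append((end_time - start, eid))
--         start = end_time
--     best = max(d for d, _ in pairs)
--     return min(e for d, e in pairs if d == best)
-- ===== Notes on version B (the rewrite author's own statement) =====
-- stated objective: alternative
-- what changed: Replaces A's single online best-tracking pass (running longest/res/start state with two conditional updates) by a table of (duration, eid) pairs followed by two separate reductions: max over durations, then min over the ids attaining it; Pre_ excludes empty logs and all-negative-duration logs (where A returns the float sentinel inf, not an int) and entries not of length 2 (where A raises ValueError).
-- outside the precondition, e.g. on hardestWorker(1, []): A returns inf, B raises ValueError; on hardestWorker(1, [[3, -5]]): A returns inf, B returns 3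
import Mathlib
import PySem

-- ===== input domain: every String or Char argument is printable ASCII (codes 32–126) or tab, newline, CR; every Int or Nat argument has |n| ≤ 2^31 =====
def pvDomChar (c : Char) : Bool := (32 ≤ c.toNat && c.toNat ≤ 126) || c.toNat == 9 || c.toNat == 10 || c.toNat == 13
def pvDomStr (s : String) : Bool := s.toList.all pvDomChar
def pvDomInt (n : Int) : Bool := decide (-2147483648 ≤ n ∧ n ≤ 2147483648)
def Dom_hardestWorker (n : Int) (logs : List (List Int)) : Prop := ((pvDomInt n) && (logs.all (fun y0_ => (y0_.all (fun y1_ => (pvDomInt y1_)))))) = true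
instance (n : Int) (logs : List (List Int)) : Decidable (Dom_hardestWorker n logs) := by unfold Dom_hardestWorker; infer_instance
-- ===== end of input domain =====

-- B replaces A's single online best-tracking pass by a (duration, eid) table plus two
-- separate reductions (max of durations, then min of the ids attaining it); same O(n) cost.

-- ===== PORT A =====
-- Python's float("inf") sentinel for res is modelled as `none`; min(res, eid) is pvOptMin2.
-- Under Pre_ the final res is an int (some _); .getD 0 only fires outside Pre_.
def pvOptMin2 (r : Option Int) (e : Int) : Int :=
  match r with
  | none => e
  | some v => min v e

-- the loop of A: state (longest, res, start); each entry unpacked as eid, end_time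
-- (exact for entries of length 2; other lengths raise ValueError in Python, excluded by Pre_)
def pvAGo : List (List Int) → Int → Option Int → Int → Option Int
  | [], _, res, _ => res
  | l :: t, longest, res, start =>
      let eid := l.getD 0 0
      let endt := l.getD 1 0
      let longest' := if longest < endt - start then endt - start else longest
      let res' := if longest < endt - start then some eid else res
      let res'' := if endt - start = longest' then some (pvOptMin2 res' eid) else res'
      pvAGo t longest' res'' endt

def hardestWorker (n : Int) (logs : List (List Int)) : Int :=
  (pvAGo logs 0 none 0).getD 0

-- ===== PORT B =====
-- the table-building pass of Source B: list of (end_time - start, eid)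
def pvBPairs : List (List Int) → Int → List (Int × Int)
  | [], _ => []
  | l :: t, start =>
      let eid := l.getD 0 0
      let endt := l.getD 1 0
      (endt - start, eid) :: pvBPairs t endt

def hardestWorker_alt (n : Int) (logs : List (List Int)) : Int :=
  match PySem.List.max? ((pvBPairs logs 0).map (·.1)) (fun x => x) with
  | none => 0  -- Python: max() raises ValueError on empty (excluded by Pre_)
  | some best =>
      (PySem.List.min? (((pvBPairs logs 0).filter (fun q => q.1 = best)).map (·.2)) (fun x => x)).getD 0

-- ===== PRECONDITION & SPEC =====
def pvEnds (logs : List (List Int)) : List Int := logs.map (fun l => l.getD 1 0)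
-- the task durations: end_time[i] - end_time[i-1], with end_time[-1] = 0
def pvDurs (logs : List (List Int)) : List Int :=
  List.zipWith (fun a b => a - b) (pvEnds logs) (0 :: pvEnds logs)

-- Pre_ excludes: empty logs and logs whose durations are all negative (there A returns the
-- float sentinel inf, not an int), and entries not of length 2 (there A raises ValueError).
def Pre_hardestWorker (n : Int) (logs : List (List Int)) : Prop :=
  logs ≠ [] ∧ (∀ l ∈ logs, l.length = 2) ∧ ∃ d ∈ pvDurs logs, 0 ≤ d

instance (n : Int) (logs : List (List Int)) : Decidable (Pre_hardestWorker n logs) := by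
  unfold Pre_hardestWorker; infer_instance

def pvWitness_hardestWorker : Int × List (List Int) := (2, [[1, 3], [2, 5]])

def Spec_hardestWorker (n : Int) (logs : List (List Int)) (out : Int) : Prop := out = hardestWorker_alt n logs
instance (n : Int) (logs : List (List Int)) (out : Int) : Decidable (Spec_hardestWorker n logs out) := by unfold Spec_hardestWorker; infer_instance

-- ===== CLAIM (what is proved, stated in full; the proofs are below) =====
def Claim_equal_hardestWorker : Prop := ∀ (n : Int) (logs : List (List Int)), Dom_hardestWorker n logs → Pre_hardestWorker n logs → Spec_hardestWorker n logs (hardestWorker n logs)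

-- ===== LEMMAS AND PROOFS =====

-- A's loop depends on the logs only through the (duration, eid) pairs
def pvFoldA : List (Int × Int) → Int → Option Int → Option Int
  | [], _, res => res
  | (d, e) :: t, longest, res =>
      let longest' := if longest < d then d else longest
      let res' := if longest < d then some e else res
      let res'' := if d = longest' then some (pvOptMin2 res' e) else res'
      pvFoldA t longest' res''

lemma pvAGo_eq_foldA (logs : List (List Int)) :
    ∀ (longest : Int) (res : Option Int) (start : Int),
      pvAGo logs longest res start = pvFoldA (pvBPairs logs start) longest res := by
  induction logs with
  | nil => intro _ _ _; rfl
  | cons l t ih =>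
      intro longest res start
      simp only [pvAGo, pvBPairs, pvFoldA]
      exact ih _ _ _

lemma pvMapFst_bPairs (logs : List (List Int)) :
    ∀ start, (pvBPairs logs start).map (·.1)
      = List.zipWith (fun a b => a - b) (pvEnds logs) (start :: pvEnds logs) := by
  induction logs with
  | nil => intro _; rfl
  | cons l t ih =>
      intro start
      simp only [pvBPairs, pvEnds, List.map_cons, List.zipWith_cons_cons]
      exact congrArg _ (ih _)

lemma pvLe_foldl_max (t : List Int) : ∀ x : Int, x ≤ t.foldl max x := by
  induction t with
  | nil => intro x; simp [List.foldl]
  | cons d t ih =>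
      intro x
      calc x ≤ max x d := le_max_left _ _
        _ ≤ t.foldl max (max x d) := ih _
      
lemma pvMem_le_foldl_max (t : List Int) : ∀ (x d : Int), d ∈ t → d ≤ t.foldl max x := by
  induction t with
  | nil => intro _ _ h; cases h
  | cons a t ih =>
      intro x d h
      rcases List.mem_cons.mp h with h | h
      · subst h
        calc d ≤ max x d := le_max_right _ _
          _ ≤ t.foldl max (max x d) := pvLe_foldl_max _ _
      · exact ih _ _ h

lemma pvFoldl_max_mem (t : List Int) : ∀ x : Int, t.foldl max x = x ∨ t.foldl max x ∈ t := by
  induction t with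
  | nil => intro x; left; rfl
  | cons a t ih =>
      intro x
      rcases ih (max x a) with h | h
      · simp only [List.foldl_cons, h]
        rcases max_choice x a with h' | h'
        · left; exact h'
        · right; rw [h']; exact List.mem_cons_self
      · right; exact List.mem_cons_of_mem _ h

lemma pvFoldl_max_max (t : List Int) : ∀ a x : Int, t.foldl max (max a x) = max a (t.foldl max x) := by
  induction t with
  | nil => intro a x; rfl
  | cons d t ih =>
      intro a x
      simp only [List.foldl_cons, max_assoc]
      exact ih a (max x d)

-- one min-accumulating step: res = min(res, e) with res possibly the inf sentinel
def pvStep (r : Option Int) (e : Int) : Option Int := some (pvOptMin2 r e)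

lemma pvFoldl_pair_max (t : List (Int × Int)) :
    ∀ x : Int, t.foldl (fun m q => max m q.1) x = (t.map (·.1)).foldl max x := by
  induction t with
  | nil => intro _; rfl
  | cons q t ih => intro x; simp only [List.foldl_cons, List.map_cons]; exact ih _

-- the cons step of the characterisation, with the tail's running max abstracted as M
lemma pvFoldA_char_step (longest d e M : Int) (res : Option Int) (t : List (Int × Int))
    (hup : max longest d ≤ M) :
    List.foldl pvStep
      (if M = max longest d then
        (if d = max longest d then some (pvOptMin2 (if longest < d then some e else res) e)
         else if longest < d then some e else res)
       else none)
      ((t.filter (fun q => q.1 = M)).map (·.2)) =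
    List.foldl pvStep (if M = longest then res else none)
      (((((d, e) :: t)).filter (fun q => q.1 = M)).map (·.2)) := by
  simp only [List.filter_cons]
  rcases max_choice longest d with hmx | hmx <;> rw [hmx] at hup ⊢
  · have hdle : d ≤ longest := max_eq_left_iff.mp hmx
    split_ifs <;> simp_all [pvStep, pvOptMin2, List.foldl_cons] <;> omega
  · have hld : longest ≤ d := max_eq_right_iff.mp hmx
    split_ifs <;> simp_all [pvStep, pvOptMin2, List.foldl_cons, min_self] <;> omega

-- characterisation of A's fold: take the ids whose duration attains the running max M,
-- fold min over them, starting from res if M stays at the initial longest, else fresh.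
lemma pvFoldA_char (p : List (Int × Int)) :
    ∀ (longest : Int) (res : Option Int),
      pvFoldA p longest res =
        ((p.filter (fun q => q.1 = p.foldl (fun m q => max m q.1) longest)).map (·.2)).foldl
          pvStep (if p.foldl (fun m q => max m q.1) longest = longest then res else none) := by
  induction p with
  | nil => intro longest res; simp [pvFoldA]
  | cons q t ih =>
      intro longest res
      obtain ⟨d, e⟩ := q
      simp only [pvFoldA, List.foldl_cons]
      rw [ih]
      have hlon : (if longest < d then d else longest) = max longest d := by
        split_ifs with h
        · exact (max_eq_right (le_of_lt h)).symm
        · exact (max_eq_left (not_lt.mp h)).symm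
      rw [hlon]
      exact pvFoldA_char_step longest d e _ res t
        (by rw [pvFoldl_pair_max]; exact pvLe_foldl_max _ _)

lemma pvFoldl_step_some (t : List Int) : ∀ x : Int, t.foldl pvStep (some x) = some (t.foldl min x) := by
  induction t with
  | nil => intro x; rfl
  | cons e t ih =>
      intro x
      simp only [List.foldl_cons, pvStep, pvOptMin2]
      exact ih _

-- ===== VERDICT (by name: the statement is the Claim_ definition above) =====
theorem hardestWorker_spec : Claim_equal_hardestWorker := by
  intro n logs _ hpre
  obtain ⟨hne, _, d0, hd0mem, hd0⟩ := hpre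
  unfold Spec_hardestWorker hardestWorker
  set p := pvBPairs logs 0 with hp
  have hds : p.map (·.1) = pvDurs logs := by rw [hp, pvMapFst_bPairs]; rfl
  -- the duration list is nonempty
  obtain ⟨l0, t0, hlogs⟩ := List.exists_cons_of_ne_nil hne
  have hpcons : p.map (·.1) = (l0.getD 1 0 - 0) :: (pvBPairs t0 (l0.getD 1 0)).map (·.1) := by
    rw [hp, hlogs]; rfl
  obtain ⟨x, t, hxt⟩ : ∃ x t, p.map (·.1) = x :: t := ⟨_, _, hpcons⟩
  -- B's best = running max of durations from x; relate to A's running max from 0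
  have hbest : PySem.List.max? (p.map (·.1)) (fun y => y) = some (t.foldl max x) := by
    rw [hxt]; exact PySem.List.max?_id_cons x t
  set best := t.foldl max x with hbestdef
  -- best ≥ d0 ≥ 0, hence folding max from 0 gives the same value
  have hd0' : d0 ∈ p.map (·.1) := hds ▸ hd0mem
  have hd0le : d0 ≤ best := by
    rw [hxt] at hd0'
    rcases List.mem_cons.mp hd0' with h | h
    · subst h; exact pvLe_foldl_max _ _
    · exact pvMem_le_foldl_max _ _ _ h
  have hbest0 : 0 ≤ best := le_trans hd0 hd0le
  have hM : p.foldl (fun m q => max m q.1) 0 = best := by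
    rw [pvFoldl_pair_max, hxt]
    simp only [List.foldl_cons]
    rw [pvFoldl_max_max t 0 x, ← hbestdef]
    exact max_eq_right hbest0
  -- best is attained by some pair, so the filtered id list is nonempty
  have hattain : ∃ q ∈ p, q.1 = best := by
    have : best ∈ p.map (·.1) := by
      rw [hxt]
      rcases pvFoldl_max_mem t x with h | h
      · rw [hbestdef, h]; exact List.mem_cons_self
      · exact List.mem_cons_of_mem _ h
    obtain ⟨q, hq, hq1⟩ := List.mem_map.mp this
    exact ⟨q, hq, hq1⟩
  have hfne : (p.filter (fun q => q.1 = best)).map (·.2) ≠ [] := by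
    obtain ⟨q, hq, hq1⟩ := hattain
    simp only [ne_eq, List.map_eq_nil_iff, List.filter_eq_nil_iff, not_forall]
    exact ⟨q, hq, by simp [hq1]⟩
  obtain ⟨c, ct, hcands⟩ := List.exists_cons_of_ne_nil hfne
  -- evaluate B: the max? branch fires with best
  have hB : hardestWorker_alt n logs
      = (PySem.List.min? ((p.filter (fun q => q.1 = best)).map (·.2)) (fun x => x)).getD 0 := by
    unfold hardestWorker_alt
    rw [← hp, hbest]
  rw [hB, hcands, PySem.List.min?_id_cons c ct]
  -- evaluate A via the characterisation
  rw [pvAGo_eq_foldA, ← hp, pvFoldA_char, hM, hcands, ite_self, List.foldl_cons]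
  have hc : pvStep none c = some c := rfl
  rw [hc, pvFoldl_step_some]
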